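-- pv_equiv track=rewrite | github.com/KelseySt/dance-ai | flaskr/dtw.py | stu_to_ref
-- ===== SOURCE A (Python) =====
-- def stu_to_ref(threshold, path):
--     dict = {}
--     for pair in path:
--         if pair[0] in dict:
--            dict[pair[0]].append(pair[1])
--         else:
--            dict[pair[0]] = [pair[1]]
--
--     mismatch_pairs = {}
--     for key, value in dict.items():
--        if len(value) > threshold:
--            mismatch_pairs[key] = value
--
--     return mismatch_pairs
-- ===== SOURCE B (Python) =====
-- def stu_to_ref(threshold, path):
--     counts = {}
--     for pair in path:
--         counts[pair[0]] = counts.get(pair[0], 0) + 1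
--     result = {}
--     for key, value in path:
--         if counts[key] > threshold:
--             if key in result:
--                 result[key].append(value)
--             else:
--                 result[key] = [value]
--     return result
-- ===== Notes on version B (the rewrite author's own statement) =====
-- stated objective: alternative
-- what changed: Instead of grouping all pairs into a dict and then filtering the finished groups by size, B first tabulates occurrence counts of the first elements in one pass and then repopulates the result directly from the source sequence, appending only values whose key count exceeds the threshold.
import Mathlib
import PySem

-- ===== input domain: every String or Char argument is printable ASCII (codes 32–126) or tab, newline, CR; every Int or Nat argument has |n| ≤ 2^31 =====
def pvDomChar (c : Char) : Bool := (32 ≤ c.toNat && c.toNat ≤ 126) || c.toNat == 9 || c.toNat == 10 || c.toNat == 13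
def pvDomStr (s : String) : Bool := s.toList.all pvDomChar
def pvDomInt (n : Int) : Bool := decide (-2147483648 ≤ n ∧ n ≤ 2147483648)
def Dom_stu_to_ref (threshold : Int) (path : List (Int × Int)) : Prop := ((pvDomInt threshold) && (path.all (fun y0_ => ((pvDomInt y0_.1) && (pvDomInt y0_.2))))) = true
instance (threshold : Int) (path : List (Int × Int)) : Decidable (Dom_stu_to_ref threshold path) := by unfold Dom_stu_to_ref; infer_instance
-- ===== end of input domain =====

-- B tabulates key counts first and then repopulates the result straight from the
-- source list, replacing A's "group everything, then filter the groups" shape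
-- (alternative decomposition, same asymptotic cost).


-- ===== PORT A =====
def stu_to_ref (threshold : Int) (path : List (Int × Int)) : List (Int × List Int) :=
  -- dict = {}; for pair in path: append / create the group
  let d := path.foldl (fun d pair =>
      if d.contains pair.1 then d.modify pair.1 [] (fun v => v ++ [pair.2])
      else d.insert pair.1 [pair.2]) PySem.Dict.empty
  -- mismatch_pairs = {}; for key, value in dict.items(): keep if len(value) > threshold
  let mismatch := d.items.foldl (fun m kv =>
      if (kv.2.length : Int) > threshold then m.insert kv.1 kv.2 else m) PySem.Dict.empty
  mismatch.items

-- ===== PORT B =====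
def stu_to_ref_alt (threshold : Int) (path : List (Int × Int)) : List (Int × List Int) :=
  -- counts = {}; for pair in path: counts[pair[0]] = counts.get(pair[0], 0) + 1
  let counts := path.foldl (fun c pair => c.insert pair.1 (c.getD pair.1 0 + 1)) PySem.Dict.empty
  -- result = {}; for key, value in path: if counts[key] > threshold: append / create
  -- (counts[key] is always present here, so getD is exact: no KeyError is reachable)
  let result := path.foldl (fun r pair =>
      if counts.getD pair.1 0 > threshold then
        (if r.contains pair.1 then r.modify pair.1 [] (fun v => v ++ [pair.2])
         else r.insert pair.1 [pair.2])
      else r) PySem.Dict.empty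
  result.items

-- ===== PRECONDITION & SPEC =====
def Spec_stu_to_ref (threshold : Int) (path : List (Int × Int)) (out : List (Int × List Int)) : Prop := out = stu_to_ref_alt threshold path
instance (threshold : Int) (path : List (Int × Int)) (out : List (Int × List Int)) : Decidable (Spec_stu_to_ref threshold path out) := by unfold Spec_stu_to_ref; infer_instance

-- ===== CLAIM (what is proved, stated in full; the proofs are below) =====
def Claim_equal_stu_to_ref : Prop := ∀ (threshold : Int) (path : List (Int × Int)), Dom_stu_to_ref threshold path → Spec_stu_to_ref threshold path (stu_to_ref threshold path)

-- ===== LEMMAS AND PROOFS =====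

-- the canonical grouping loop both ports reduce to
def pvGroup (l : List (Int × Int)) : PySem.Dict Int (List Int) :=
  l.foldl (fun d p => d.modify p.1 [] (fun v => v ++ [p.2])) PySem.Dict.empty

-- A's (and B's) "append or create" body IS an unconditional modify
theorem pv_grp_body (d : PySem.Dict Int (List Int)) (p : Int × Int) :
    (if d.contains p.1 then d.modify p.1 [] (fun v => v ++ [p.2]) else d.insert p.1 [p.2])
      = d.modify p.1 [] (fun v => v ++ [p.2]) := by
  by_cases h : d.contains p.1
  · simp [h]
  · have h' : d.contains p.1 = false := by simpa using h
    rw [PySem.Dict.modify, PySem.Dict.getD_of_not_contains (h := h')]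
    simp [h']

-- first-occurrence dedup commutes with filter
theorem pv_set_foldl_filter (p : Int → Bool) (l : List Int) :
    ∀ s : PySem.Set Int,
      (List.foldl PySem.Set.add s l).filter p
        = List.foldl PySem.Set.add (s.filter p) (l.filter p) := by
  induction l with
  | nil => intro s; rfl
  | cons x l ih =>
    intro s
    by_cases hp : p x = true
    · have hadd : (PySem.Set.add s x).filter p = PySem.Set.add (s.filter p) x := by
        by_cases hm : x ∈ s
        · simp [PySem.Set.add, PySem.Set.contains, hm, hp, List.mem_filter]
        · simp [PySem.Set.add, PySem.Set.contains, hm, hp, List.mem_filter,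
            List.filter_append]
      simp only [List.foldl_cons, List.filter_cons, hp, if_pos trivial]
      rw [ih (PySem.Set.add s x), hadd]
    · have hp' : p x = false := by simpa using hp
      have hadd : (PySem.Set.add s x).filter p = s.filter p := by
        by_cases hm : x ∈ s
        · simp [PySem.Set.add, PySem.Set.contains, hm]
        · simp [PySem.Set.add, PySem.Set.contains, hm, List.filter_append, hp']
      simp only [List.foldl_cons, List.filter_cons, hp']
      rw [ih (PySem.Set.add s x), hadd]
      simp

theorem pv_ofList_filter (p : Int → Bool) (l : List Int) :
    (PySem.Set.ofList l).filter p = PySem.Set.ofList (l.filter p) := by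
  unfold PySem.Set.ofList
  rw [pv_set_foldl_filter p l PySem.Set.empty]
  rfl

theorem pv_group_keys (l : List (Int × Int)) :
    (pvGroup l).keys = PySem.Set.ofList (l.map (·.1)) := by
  unfold pvGroup
  rw [PySem.Dict.keys_foldl_modify_key l (·.1) [] (fun _ x => (fun v => v ++ [x.2]))]
  rw [PySem.Dict.keys_empty, PySem.Set.update_eq_append_filter]
  simp [PySem.Set.contains]

theorem pv_group_nodup (l : List (Int × Int)) : (pvGroup l).keys.Nodup := by
  unfold pvGroup
  exact PySem.Dict.nodup_keys_foldl_modify_key l (·.1) [] (fun _ x => (fun v => v ++ [x.2]))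
    PySem.Dict.empty PySem.Dict.nodup_keys_empty

theorem pv_group_getD (l : List (Int × Int)) (k : Int) :
    (pvGroup l).getD k [] = (l.filter (fun p => p.1 == k)).map (·.2) := by
  unfold pvGroup
  rw [PySem.Dict.getD_foldl_modify_append, PySem.Dict.getD_empty]
  simp

-- characterization of A's result
theorem pv_A_char (threshold : Int) (path : List (Int × Int)) :
    stu_to_ref threshold path
      = (pvGroup path).items.filter (fun kv => decide ((kv.2.length : Int) > threshold)) := by
  unfold stu_to_ref
  simp only [pv_grp_body]
  rw [show (List.foldl (fun d (pair : Int × Int) => d.modify pair.1 [] fun v => v ++ [pair.2])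
        PySem.Dict.empty path) = pvGroup path from rfl]
  rw [PySem.List.foldl_ite_eq_foldl_filter
        (p := fun kv : Int × List Int => (kv.2.length : Int) > threshold)
        (f := fun m kv => m.insert kv.1 kv.2) (pvGroup path).items PySem.Dict.empty]
  have hfresh : ∀ kv ∈ ((pvGroup path).items.filter
      (fun kv => decide ((kv.2.length : Int) > threshold))),
      (PySem.Dict.empty : PySem.Dict Int (List Int)).contains kv.1 = false := by
    intro kv _; exact PySem.Dict.contains_empty kv.1
  have hnd : (((pvGroup path).items.filter
      (fun kv => decide ((kv.2.length : Int) > threshold))).map (·.1)).Nodup := by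
    have h1 : (pvGroup path).keys.Nodup := pv_group_nodup path
    have h2 : ((pvGroup path).items.map (·.1)).Nodup := by
      simpa [PySem.Dict.keys] using h1
    exact (List.Sublist.map (fun kv : Int × List Int => kv.1) List.filter_sublist).nodup h2
  have hfold := PySem.Dict.items_foldl_insert_fresh
      ((pvGroup path).items.filter (fun kv => decide ((kv.2.length : Int) > threshold)))
      (·.1) (·.2) PySem.Dict.empty hfresh hnd
  simpa using hfold

-- characterization of B's result
theorem pv_B_char (threshold : Int) (path : List (Int × Int)) :
    stu_to_ref_alt threshold path
      = (pvGroup (path.filter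
          (fun p => decide ((((path.map (·.1)).count p.1 : Int)) > threshold)))).items := by
  unfold stu_to_ref_alt
  have hcounts : path.foldl (fun c pair => c.insert pair.1 (c.getD pair.1 0 + 1))
      PySem.Dict.empty = PySem.Dict.counter (path.map (·.1)) := by
    rw [← PySem.Dict.foldl_insert_getD_add_one_eq_counter, List.foldl_map]
  rw [hcounts]
  simp only [PySem.Dict.getD_counter, pv_grp_body]
  have hres : (path.foldl (fun r (pair : Int × Int) =>
        if (((path.map (·.1)).count pair.1 : Int)) > threshold then
          r.modify pair.1 [] (fun v => v ++ [pair.2]) else r) PySem.Dict.empty)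
      = List.foldl (fun r (pair : Int × Int) => r.modify pair.1 [] (fun v => v ++ [pair.2]))
          PySem.Dict.empty
          (path.filter (fun p => decide ((((path.map (·.1)).count p.1 : Int)) > threshold))) :=
    PySem.List.foldl_ite_eq_foldl_filter _ _ path PySem.Dict.empty
  rw [hres]
  rfl




theorem pv_main (threshold : Int) (path : List (Int × Int)) :
    stu_to_ref threshold path = stu_to_ref_alt threshold path := by
  rw [pv_A_char, pv_B_char]
  -- names
  set F : Int → Bool := fun k => decide ((((path.map (·.1)).count k : Int)) > threshold) with hF
  have hpred : (fun p : Int × Int => decide ((((path.map (·.1)).count p.1 : Int)) > threshold))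
      = fun p : Int × Int => F p.1 := rfl
  rw [hpred]
  -- LHS: items of group, filtered
  rw [PySem.Dict.items_eq_map_keys (pvGroup path) (pv_group_nodup path) ([] : List Int)]
  rw [List.filter_map]
  -- RHS: items of group of filtered path
  rw [PySem.Dict.items_eq_map_keys (pvGroup (path.filter (fun p => F p.1)))
        (pv_group_nodup _) ([] : List Int)]
  -- keys of RHS group = keys of LHS group filtered by F
  have hkeys : (pvGroup (path.filter (fun p => F p.1))).keys
      = ((pvGroup path).keys).filter F := by
    rw [pv_group_keys, pv_group_keys]
    have hmapfil : (path.filter (fun p => F p.1)).map (·.1)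
        = (path.map (·.1)).filter F := by
      rw [List.filter_map]; rfl
    rw [hmapfil, pv_ofList_filter]
  rw [hkeys]
  -- LHS filter predicate equals F
  have hGF : ((fun kv : Int × List Int => decide ((kv.2.length : Int) > threshold)) ∘
      (fun k => (k, (pvGroup path).getD k []))) = F := by
    funext k
    simp only [Function.comp, pv_group_getD, List.length_map, hF]
    congr 1
    have : (path.filter (fun p => p.1 == k)).length = (path.map (·.1)).count k := by
      rw [List.count_eq_countP, List.countP_map, List.countP_eq_length_filter]
      rfl
    rw [this]
  rw [hGF]
  -- value lists agree on kept keys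
  apply List.map_congr_left
  intro k hk
  have hFk : F k = true := (List.mem_filter.mp hk).2
  have hvals : (pvGroup (path.filter (fun p => F p.1))).getD k []
      = (pvGroup path).getD k [] := by
    rw [pv_group_getD, pv_group_getD, List.filter_filter]
    congr 1
    apply List.filter_congr
    intro p _
    by_cases hpk : p.1 = k
    · simp [hpk, hFk]
    · simp [hpk]
  rw [hvals]

-- ===== VERDICT (by name: the statement is the Claim_ definition above) =====
theorem stu_to_ref_spec : Claim_equal_stu_to_ref := by
  intro threshold path _
  unfold Spec_stu_to_ref
  exact pv_main threshold path
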